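-- pv_equiv track=rewrite | github.com/peter6286/Intern_ | IXL.py | closed
-- ===== SOURCE A (Python) =====
-- def closed(num):
--     sum = 0
--     numdict={"0":1,"4":1,"6":1,"9":1,"8":2}
--     for item in str(num):
--         if item not in numdict:
--             sum += 0
--         else:
--             sum += numdict[item]
--     return sum
-- ===== SOURCE B (Python) =====
-- def closed(num):
--     n = abs(num)
--     total = 1 if n == 0 else 0
--     while n:
--         d = n % 10
--         total += 2 if d == 8 else (1 if d in (0, 4, 6, 9) else 0)
--         n //= 10
--     return total
-- ===== Notes on version B (the rewrite author's own statement) =====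
-- stated objective: alternative
-- what changed: Replaces the string conversion plus per-character dict-lookup loop by pure integer arithmetic: repeated divmod-by-10 digit extraction with a weight expression, never building str(num).
import Mathlib
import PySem

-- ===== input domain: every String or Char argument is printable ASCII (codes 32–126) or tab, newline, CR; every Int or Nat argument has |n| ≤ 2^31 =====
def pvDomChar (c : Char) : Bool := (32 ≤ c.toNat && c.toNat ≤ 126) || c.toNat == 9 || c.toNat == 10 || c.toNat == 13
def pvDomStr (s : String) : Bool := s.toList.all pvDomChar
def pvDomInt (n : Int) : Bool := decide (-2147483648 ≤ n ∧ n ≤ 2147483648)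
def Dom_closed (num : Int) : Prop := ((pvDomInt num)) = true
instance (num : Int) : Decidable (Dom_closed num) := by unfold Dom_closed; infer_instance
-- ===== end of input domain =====

-- B replaces A's str()-and-dict-lookup character loop by pure integer arithmetic
-- (repeated divmod-by-10 digit extraction), never building the string (objective: alternative).


-- ===== PORT A =====
def closed (num : Int) : Int :=
  let numdict : PySem.Dict Char Int :=
    PySem.Dict.ofList [('0', 1), ('4', 1), ('6', 1), ('9', 1), ('8', 2)]
  (PySem.Int.toChars num).foldl
    (fun sum item =>
      if numdict.contains item = false then sum + 0
      else sum + numdict.getD item 0) 0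

-- ===== PORT B =====
-- the 'while n:' loop of Source B, as a tail recursion over the remaining number and the accumulator
def closedAltLoop (n : Nat) (total : Int) : Int :=
  if n = 0 then total
  else
    closedAltLoop (n / 10)
      (total + (if n % 10 = 8 then 2 else if n % 10 = 0 ∨ n % 10 = 4 ∨ n % 10 = 6 ∨ n % 10 = 9 then 1 else 0))
decreasing_by exact Nat.div_lt_self (Nat.pos_of_ne_zero (by assumption)) (by norm_num)

def closed_alt (num : Int) : Int :=
  let n := num.natAbs
  closedAltLoop n (if n = 0 then 1 else 0)

-- ===== PRECONDITION & SPEC =====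
def Spec_closed (num : Int) (out : Int) : Prop := out = closed_alt num
instance (num : Int) (out : Int) : Decidable (Spec_closed num out) := by unfold Spec_closed; infer_instance

-- ===== CLAIM (what is proved, stated in full; the proofs are below) =====
def Claim_equal_closed : Prop := ∀ (num : Int), Dom_closed num → Spec_closed num (closed num)

-- ===== LEMMAS AND PROOFS =====

-- per-character contribution of A's dict step
def digitWeight (c : Char) : Int :=
  (if c = '0' then 1 else 0) + (if c = '4' then 1 else 0) + (if c = '6' then 1 else 0)
    + (if c = '9' then 1 else 0) + 2 * (if c = '8' then 1 else 0)

-- numeric weight used by B's loop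
def wdigit (d : Nat) : Int :=
  if d = 8 then 2 else if d = 0 ∨ d = 4 ∨ d = 6 ∨ d = 9 then 1 else 0

theorem closedAltLoop_eq (n : Nat) (t : Int) :
    closedAltLoop n t = if n = 0 then t else closedAltLoop (n / 10) (t + wdigit (n % 10)) := by
  rw [closedAltLoop]; simp [wdigit]

theorem digitWeight_digitChar (d : Nat) (h : d < 10) :
    digitWeight (Nat.digitChar d) = wdigit d := by
  interval_cases d <;> decide

theorem closedAltLoop_acc (n : Nat) (t : Int) : closedAltLoop n t = t + closedAltLoop n 0 := by
  induction n using Nat.strong_induction_on generalizing t with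
  | _ n ih =>
    by_cases h : n = 0
    · simp [closedAltLoop_eq, h]
    · have hlt : n / 10 < n := Nat.div_lt_self (Nat.pos_of_ne_zero h) (by norm_num)
      rw [closedAltLoop_eq n t, closedAltLoop_eq n 0, if_neg h, if_neg h,
        ih (n / 10) hlt, ih (n / 10) hlt (t := 0 + wdigit (n % 10))]
      ring

theorem closedAltLoop_unfold (n : Nat) (h : n ≠ 0) :
    closedAltLoop n 0 = wdigit (n % 10) + closedAltLoop (n / 10) 0 := by
  rw [closedAltLoop_eq, if_neg h, closedAltLoop_acc]
  ring

-- per-character contribution of A's dict step (proved equal to the dict branch below)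
theorem step_eq (acc : Int) (c : Char) :
    (if (PySem.Dict.ofList [('0', (1:Int)), ('4', 1), ('6', 1), ('9', 1), ('8', 2)]).contains c = false
      then acc + 0
      else acc + (PySem.Dict.ofList [('0', (1:Int)), ('4', 1), ('6', 1), ('9', 1), ('8', 2)]).getD c 0)
      = acc + digitWeight c := by
  by_cases h0 : c = '0'
  · subst h0; simp [digitWeight]; rfl
  by_cases h4 : c = '4'
  · subst h4; simp [digitWeight]; rfl
  by_cases h6 : c = '6'
  · subst h6; simp [digitWeight]; rfl
  by_cases h9 : c = '9'
  · subst h9; simp [digitWeight]; rfl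
  by_cases h8 : c = '8'
  · subst h8; simp [digitWeight]; rfl
  · have hitems : (PySem.Dict.ofList [('0', (1:Int)), ('4', 1), ('6', 1), ('9', 1), ('8', 2)]).items
        = [('0', (1:Int)), ('4', 1), ('6', 1), ('9', 1), ('8', 2)] := by decide
    have hc : (PySem.Dict.ofList [('0', (1:Int)), ('4', 1), ('6', 1), ('9', 1), ('8', 2)]).contains c = false := by
      simp [PySem.Dict.contains, hitems]
      exact ⟨Ne.symm h0, Ne.symm h4, Ne.symm h6, Ne.symm h9, Ne.symm h8⟩
    rw [hc]
    simp [digitWeight, h0, h4, h6, h9, h8]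

-- A's fold is the sum of per-character weights
theorem foldl_step_eq (l : List Char) (acc : Int) :
    l.foldl
      (fun sum item =>
        if (PySem.Dict.ofList [('0', (1:Int)), ('4', 1), ('6', 1), ('9', 1), ('8', 2)]).contains item = false
        then sum + 0
        else sum + (PySem.Dict.ofList [('0', (1:Int)), ('4', 1), ('6', 1), ('9', 1), ('8', 2)]).getD item 0) acc
      = acc + (l.map digitWeight).sum := by
  induction l generalizing acc with
  | nil => simp
  | cons hd t ih => simp only [List.foldl_cons, List.map_cons, List.sum_cons]; rw [step_eq, ih]; ring

-- weight sum over Nat.toDigitsCore equals B's loop value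
theorem toDigitsCore_weight (fuel n : Nat) (ds : List Char) (hf : n < fuel) :
    ((Nat.toDigitsCore 10 fuel n ds).map digitWeight).sum
      = wdigit (n % 10) + closedAltLoop (n / 10) 0 + (ds.map digitWeight).sum := by
  induction n using Nat.strong_induction_on generalizing fuel ds with
  | _ n ih =>
    cases fuel with
    | zero => omega
    | succ f =>
      rw [Nat.toDigitsCore]
      have hd : digitWeight (Nat.digitChar (n % 10)) = wdigit (n % 10) :=
        digitWeight_digitChar _ (Nat.mod_lt _ (by norm_num))
      by_cases h : n / 10 = 0
      · simp only [h, reduceIte, List.map_cons, List.sum_cons, hd]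
        rw [closedAltLoop_eq]
        simp
      · rw [if_neg h]
        have hn10 : n / 10 < n := Nat.div_lt_self (by omega) (by norm_num)
        rw [ih (n / 10) hn10 f _ (by omega)]
        simp only [List.map_cons, List.sum_cons, hd]
        rw [closedAltLoop_unfold (n / 10) h]
        ring

theorem toDigits_weight (n : Nat) :
    ((Nat.toDigits 10 n).map digitWeight).sum = closedAltLoop n (if n = 0 then 1 else 0) := by
  by_cases h : n = 0
  · subst h
    rw [if_pos rfl, closedAltLoop_eq, if_pos rfl]
    decide
  · rw [Nat.toDigits, toDigitsCore_weight (n + 1) n [] (by omega), if_neg h,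
      closedAltLoop_unfold n h]
    simp

-- ===== VERDICT (by name: the statement is the Claim_ definition above) =====
theorem closed_spec : Claim_equal_closed := by
  intro num _
  unfold Spec_closed closed closed_alt
  simp only []
  rw [foldl_step_eq]
  unfold PySem.Int.toChars
  by_cases hneg : num < 0
  · rw [if_pos hneg]
    simp only [List.map_cons, List.sum_cons]
    rw [toDigits_weight]
    have hm : digitWeight '-' = 0 := by decide
    rw [hm]
    ring
  · rw [if_neg hneg, toDigits_weight]
    have : num.toNat = num.natAbs := by omega
    rw [this]
    ring
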